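-- pv_equiv track=rewrite | github.com/ahyangyi/openttd-newgrfs | station/stations/dovemere_2018_lib/flexible_stations/common.py | determine_platform_even
-- ===== SOURCE A (Python) =====
-- def determine_platform_even(t, d):
--     if t > d:
--         return {"f": "n", "n": "f", "d": "d"}[determine_platform_even(d, t)]
--     if (t + d) % 2 == 1:
--         return "nf"[t % 2]
--     if (t + d) % 4 == 0:
--         if t < d:
--             return "nf"[t % 2]
--         return "d"
--     if t < d - 2:
--         return "nf"[t % 2]
--     return "d"
-- ===== SOURCE B (Python) =====
-- def determine_platform_even(t, d):
--     lo, hi = (t, d) if t <= d else (d, t)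
--     if (t + d) % 2 == 0 and hi - lo <= (t + d) % 4:
--         return "d"
--     return "nf"[(lo + (t > d)) % 2]
-- ===== Notes on version B (the rewrite author's own statement) =====
-- stated objective: alternative
-- what changed: Replaced the recursive three-branch cascade with a closed-form arithmetic characterisation: the answer is 'd' iff t+d is even and |t-d| <= (t+d)%4, otherwise it is 'nf'[(min(t,d)+(t>d))%2]; no recursion, no relabelling dictionary, no branch cascade.
import Mathlib
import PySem

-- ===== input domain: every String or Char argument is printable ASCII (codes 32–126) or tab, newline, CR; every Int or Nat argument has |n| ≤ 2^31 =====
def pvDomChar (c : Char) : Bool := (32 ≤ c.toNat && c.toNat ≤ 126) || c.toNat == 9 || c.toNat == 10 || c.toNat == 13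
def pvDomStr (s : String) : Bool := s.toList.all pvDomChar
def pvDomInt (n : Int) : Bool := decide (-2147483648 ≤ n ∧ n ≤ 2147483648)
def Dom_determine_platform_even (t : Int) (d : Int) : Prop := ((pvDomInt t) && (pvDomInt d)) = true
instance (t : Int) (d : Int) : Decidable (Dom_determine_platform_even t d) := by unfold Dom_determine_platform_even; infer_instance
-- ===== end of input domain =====

-- B replaces A's recursive branch cascade + relabelling dict by one closed-form arithmetic test (alternative decomposition, same O(1) cost).

-- ===== PORT A =====
-- "nf"[t % 2]  (t % 2 ∈ {0,1}, so pyGet? never returns none; getD "" is unreachable)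
def pvNF_A (t : Int) : String := ((PySem.Str.pyGet? "nf" (PySem.Int.mod t 2)).map (fun c => String.ofList [c])).getD ""
-- {"f": "n", "n": "f", "d": "d"}[s] : exact on the three keys the recursion can produce
def pvFlipDict_A (s : String) : String :=
  if s == "f" then "n" else if s == "n" then "f" else "d"

def determine_platform_even (t : Int) (d : Int) : String :=
  if t > d then
    pvFlipDict_A (determine_platform_even d t)
  else if PySem.Int.mod (t + d) 2 = 1 then pvNF_A t
  else if PySem.Int.mod (t + d) 4 = 0 then
    (if t < d then pvNF_A t else "d")
  else if t < d - 2 then pvNF_A t else "d"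
termination_by ((if t > d then 1 else 0) : Nat)
decreasing_by simp only [if_pos ‹t > d›, if_neg (by omega : ¬ d > t)]; omega

-- ===== PORT B =====
-- "nf"[k]  with k ∈ {0,1}
def pvNF_B (a : Int) : String := ((PySem.Str.pyGet? "nf" (PySem.Int.mod a 2)).map (fun c => String.ofList [c])).getD ""

def determine_platform_even_alt (t : Int) (d : Int) : String :=
  let lo := if t ≤ d then t else d
  let hi := if t ≤ d then d else t
  if PySem.Int.mod (t + d) 2 = 0 ∧ hi - lo ≤ PySem.Int.mod (t + d) 4 then "d"
  else pvNF_B (lo + (if t > d then 1 else 0))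

-- ===== PRECONDITION & SPEC =====
def Spec_determine_platform_even (t : Int) (d : Int) (out : String) : Prop := out = determine_platform_even_alt t d
instance (t : Int) (d : Int) (out : String) : Decidable (Spec_determine_platform_even t d out) := by unfold Spec_determine_platform_even; infer_instance

-- ===== CLAIM =====
def Claim_equal_determine_platform_even : Prop := ∀ (t : Int) (d : Int), Dom_determine_platform_even t d → Spec_determine_platform_even t d (determine_platform_even t d)

-- ===== LEMMAS AND PROOFS =====

theorem pv_mod2 (a : Int) : PySem.Int.mod a 2 = a % 2 :=
  PySem.Int.mod_eq_emod_of_pos (by norm_num)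

theorem pv_mod4 (a : Int) : PySem.Int.mod a 4 = a % 4 :=
  PySem.Int.mod_eq_emod_of_pos (by norm_num)

theorem pv_nf_eq (a : Int) : pvNF_A a = if a % 2 = 0 then "n" else "f" := by
  have h : a % 2 = 0 ∨ a % 2 = 1 := by omega
  rcases h with h | h <;>
    simp [pvNF_A, h, PySem.Str.pyGet?, PySem.List.pyGet?, PySem.List.pyIdx?]

theorem pv_nfB_eq (a : Int) : pvNF_B a = if a % 2 = 0 then "n" else "f" := by
  have h : a % 2 = 0 ∨ a % 2 = 1 := by omega
  rcases h with h | h <;>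
    simp [pvNF_B, h, PySem.Str.pyGet?, PySem.List.pyGet?, PySem.List.pyIdx?]

-- t ≤ d: A's cascade agrees with B's closed form directly
theorem pv_le_case (t d : Int) (h : t ≤ d) :
    determine_platform_even t d = determine_platform_even_alt t d := by
  have hng : ¬ t > d := by omega
  rw [determine_platform_even, if_neg hng]
  simp only [determine_platform_even_alt, if_pos h, if_neg hng, add_zero,
    pv_mod2, pv_mod4, pv_nf_eq, pv_nfB_eq]
  split_ifs <;> first | rfl | omega

-- ===== VERDICT =====
theorem determine_platform_even_spec : Claim_equal_determine_platform_even := by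
  intro t d _
  unfold Spec_determine_platform_even
  by_cases h : t > d
  · have hle : d ≤ t := by omega
    rw [determine_platform_even, if_pos h, pv_le_case d t hle]
    have hng : ¬ t ≤ d := by omega
    simp only [determine_platform_even_alt, if_pos hle, if_neg hng, if_pos h,
      if_neg (by omega : ¬ d > t), add_zero, pv_nfB_eq]
    have hc : t + d = d + t := by ring
    rw [hc]
    by_cases hcond : PySem.Int.mod (d + t) 2 = 0 ∧ t - d ≤ PySem.Int.mod (d + t) 4
    · rw [if_pos hcond, if_pos hcond]; rfl
    · rw [if_neg hcond, if_neg hcond]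
      have hd : d % 2 = 0 ∨ d % 2 = 1 := by omega
      rcases hd with hd | hd <;>
        simp [pvFlipDict_A, hd, show (d + 1) % 2 = (if d % 2 = 0 then 1 else 0) by omega]
  · exact pv_le_case t d (by omega)
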